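-- pv_equiv track=rewrite | github.com/jonathasfsilva/PYTHON | WhatsappBot/bot.py | organizaLista
-- ===== SOURCE A (Python) =====
-- def organizaLista(lista):
--     #lista = lista[::-1]
--     novaLista = []
--     c = 0
--     linha = []
--     for i in range(len(lista)):
--         item = lista[i]
--         if not item in ['1','2','3','4']:
--             linha.append(item)
--             c += 1
--         if c == 3:
--             c = 0
--             novaLista.append(linha)
--             linha = []
--     else:
--         novaLista.append(linha)
--
--     return novaLista
-- ===== SOURCE B (Python) =====
-- def organizaLista(lista):
--     filtered = [x for x in lista if x not in ('1', '2', '3', '4')]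
--     n = len(filtered) // 3 + 1
--     return [filtered[3 * i:3 * i + 3] for i in range(n)]
-- ===== Notes on version B (the rewrite author's own statement) =====
-- stated objective: simpler
-- what changed: B filters once with a comprehension and then slices the filtered list into index-computed chunks of three (len//3+1 of them, reproducing A's always-appended trailing group), instead of maintaining a running counter and incremental sublist inside one loop.
import Mathlib
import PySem

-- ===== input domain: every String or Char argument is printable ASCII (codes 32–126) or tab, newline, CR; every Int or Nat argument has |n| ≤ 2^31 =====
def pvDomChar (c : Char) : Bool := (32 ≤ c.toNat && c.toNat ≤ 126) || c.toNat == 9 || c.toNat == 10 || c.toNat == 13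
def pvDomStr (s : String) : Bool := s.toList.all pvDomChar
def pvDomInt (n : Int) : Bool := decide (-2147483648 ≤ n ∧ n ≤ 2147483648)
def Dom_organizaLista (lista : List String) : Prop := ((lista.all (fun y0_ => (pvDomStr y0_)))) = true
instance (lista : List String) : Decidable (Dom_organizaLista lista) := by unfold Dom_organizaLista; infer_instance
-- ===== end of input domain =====

-- B filters once and slices the filtered list into index-computed chunks of three (len//3+1 of them, reproducing A's always-appended trailing group) instead of A's counter/accumulator loop; objective: simpler.

-- ===== PORT A =====
-- loop body of A: the two ifs, in Python's order (indices are always in range, so pyGetD at the call site is exact)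
def pvStepA (st : List (List String) × Int × List String) (item : String) :
    List (List String) × Int × List String :=
  let st1 := if !(["1", "2", "3", "4"].contains item) then (st.1, st.2.1 + 1, st.2.2 ++ [item]) else st
  if st1.2.1 == 3 then (st1.1 ++ [st1.2.2], 0, []) else st1

def organizaLista (lista : List String) : List (List String) :=
  let final := (PySem.List.pyRange 0 lista.length 1).foldl
    (fun st i => pvStepA st (PySem.List.pyGetD lista i "")) ([], 0, [])
  final.1 ++ [final.2.2]

-- ===== PORT B =====
def organizaLista_alt (lista : List String) : List (List String) :=
  let filtered := lista.filter (fun x => !(["1", "2", "3", "4"].contains x))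
  let n := PySem.Int.floordiv filtered.length 3 + 1
  (PySem.List.pyRange 0 n 1).map (fun i => PySem.List.slice filtered (some (3 * i)) (some (3 * i + 3)))

-- ===== PRECONDITION & SPEC =====
def Spec_organizaLista (lista : List String) (out : List (List String)) : Prop := out = organizaLista_alt lista
instance (lista : List String) (out : List (List String)) : Decidable (Spec_organizaLista lista out) := by unfold Spec_organizaLista; infer_instance

-- ===== CLAIM (what is proved, stated in full; the proofs are below) =====
def Claim_equal_organizaLista : Prop := ∀ (lista : List String), Dom_organizaLista lista → Spec_organizaLista lista (organizaLista lista)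

-- ===== LEMMAS AND PROOFS =====

-- reference chunking: full groups of three, plus the (possibly empty / partial) trailing group
def pvChunk3 : List String → List (List String)
  | a :: b :: c :: rest => [a, b, c] :: pvChunk3 rest
  | rest => [rest]

-- after any step, the counter is never 3
lemma pvStepA_c_ne_three (st : List (List String) × Int × List String) (item : String) :
    (pvStepA st item).2.1 ≠ 3 := by
  simp only [pvStepA]
  split_ifs <;> simp_all

-- a skipped item leaves the state unchanged (when the counter is not 3)
lemma pvStepA_skip (st : List (List String) × Int × List String) (item : String)
    (hmem : (["1", "2", "3", "4"].contains item) = true) (hc : st.2.1 ≠ 3) :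
    pvStepA st item = st := by
  simp only [pvStepA, hmem, Bool.not_true]
  simp only [beq_iff_eq]
  exact if_neg hc

-- a kept item appends to the row and bumps (or resets) the counter
lemma pvStepA_keep (st : List (List String) × Int × List String) (item : String)
    (hmem : (["1", "2", "3", "4"].contains item) = false) :
    pvStepA st item = if st.2.1 + 1 = 3 then (st.1 ++ [st.2.2 ++ [item]], 0, [])
                      else (st.1, st.2.1 + 1, st.2.2 ++ [item]) := by
  simp only [pvStepA, hmem, Bool.not_false, if_true, beq_iff_eq]

-- folding A's step over a list equals folding it over the filtered list
lemma pvFoldA_filter (l : List String) (st : List (List String) × Int × List String)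
    (hc : st.2.1 ≠ 3) :
    l.foldl pvStepA st = (l.filter (fun x => !(["1", "2", "3", "4"].contains x))).foldl pvStepA st := by
  induction l generalizing st with
  | nil => rfl
  | cons a t ih =>
    rw [List.foldl_cons, List.filter_cons]
    by_cases h : (["1", "2", "3", "4"].contains a) = true
    · simp only [h, Bool.not_true]
      rw [pvStepA_skip st a h hc]
      exact ih st hc
    · simp only [Bool.not_eq_true] at h
      simp only [h, Bool.not_false, if_true, List.foldl_cons]
      exact ih _ (pvStepA_c_ne_three st a)

-- on a list of kept items, A's loop (from a fresh counter and row) appends exactly pvChunk3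
theorem pvFoldA_chunk : ∀ (l : List String) (acc : List (List String)),
    (∀ x ∈ l, (["1", "2", "3", "4"].contains x) = false) →
    (l.foldl pvStepA (acc, 0, [])).1 ++ [(l.foldl pvStepA (acc, 0, [])).2.2] = acc ++ pvChunk3 l
  | [], acc, _ => by simp [pvChunk3]
  | [a], acc, h => by
    have ha := h a (by simp)
    simp [pvChunk3, pvStepA_keep _ _ ha]
  | [a, b], acc, h => by
    have ha := h a (by simp)
    have hb := h b (by simp)
    simp [pvChunk3, pvStepA_keep _ _ ha, pvStepA_keep _ _ hb]
  | a :: b :: c :: rest, acc, h => by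
    have ha := h a (by simp)
    have hb := h b (by simp)
    have hc := h c (by simp)
    have h3 : pvStepA (pvStepA (pvStepA (acc, 0, []) a) b) c = (acc ++ [[a, b, c]], 0, []) := by
      rw [pvStepA_keep _ _ ha]
      norm_num
      rw [pvStepA_keep _ _ hb]
      norm_num
      rw [pvStepA_keep _ _ hc]
      norm_num
    rw [List.foldl_cons, List.foldl_cons, List.foldl_cons, h3,
        pvFoldA_chunk rest (acc ++ [[a, b, c]]) (fun x hx => h x (by simp [hx])), pvChunk3]
    simp
termination_by l => l.length

-- B's Nat-level slice comprehension is pvChunk3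
theorem pvSlicesNat : ∀ (l : List String),
    (List.range (l.length / 3 + 1)).map (fun k => (l.drop (3 * k)).take 3) = pvChunk3 l
  | [] => by simp [pvChunk3]
  | [a] => by simp [pvChunk3]
  | [a, b] => by simp [pvChunk3]
  | a :: b :: c :: rest => by
    have hlen : (a :: b :: c :: rest).length / 3 + 1 = (rest.length / 3 + 1) + 1 := by
      simp [List.length]
      omega
    rw [hlen, List.range_succ_eq_map]
    simp only [List.map_cons, List.map_map]
    rw [pvChunk3]
    refine congrArg₂ _ (by simp) ?_
    rw [← pvSlicesNat rest]
    apply List.map_congr_left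
    intro k _
    have hdrop : (a :: b :: c :: rest).drop (3 * (k + 1)) = rest.drop (3 * k) := by
      have h3 : 3 * (k + 1) = (3 * k + 1 + 1) + 1 := by ring
      rw [h3]
      simp [List.drop_succ_cons]
    simp only [Function.comp, Nat.succ_eq_add_one, hdrop]
termination_by l => l.length

-- one slice in B is a drop/take
lemma pvSlice3 (l : List String) (k : Nat) :
    PySem.List.slice l (some (3 * (k : Int))) (some (3 * (k : Int) + 3)) = (l.drop (3 * k)).take 3 := by
  have h1 : (3 * (k : Int)) = ((3 * k : Nat) : Int) := by push_cast; ring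
  have h2 : (3 * (k : Int)) + 3 = ((3 * k : Nat) : Int) + ((3 : Nat) : Int) := by push_cast; ring
  rw [h2, h1, PySem.List.slice_natCast_add]

-- B's comprehension on any list is pvChunk3 of it
lemma pvSlices_chunk (l : List String) :
    (PySem.List.pyRange 0 (PySem.Int.floordiv l.length 3 + 1) 1).map
      (fun i => PySem.List.slice l (some (3 * i)) (some (3 * i + 3))) = pvChunk3 l := by
  have hn : PySem.Int.floordiv (l.length : Int) 3 + 1 = ((l.length / 3 + 1 : Nat) : Int) := by
    rw [PySem.Int.floordiv_eq_ediv_of_pos (by norm_num)]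
    omega
  rw [hn, PySem.List.pyRange_one]
  simp only [sub_zero, Int.toNat_natCast, List.map_map]
  rw [← pvSlicesNat l]
  apply List.map_congr_left
  intro k _
  simp only [Function.comp, zero_add]
  exact pvSlice3 l k

-- ===== VERDICT (by name: the statement is the Claim_ definition above) =====
theorem organizaLista_spec : Claim_equal_organizaLista := by
  intro lista _
  show organizaLista lista = organizaLista_alt lista
  unfold organizaLista organizaLista_alt
  simp only
  rw [PySem.List.foldl_pyRange_zero_pyGetD' lista "" pvStepA ([], 0, [])]
  rw [pvFoldA_filter lista ([], 0, []) (by simp)]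
  rw [pvFoldA_chunk _ [] (fun x hx => by
    have := (List.mem_filter.mp hx).2
    simpa using this)]
  rw [pvSlices_chunk]
  simp
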